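-- pv_equiv track=rewrite | github.com/usathyan/epistract | domains/drug-discovery/validate_molecules.py | _find_nearest_entity
-- ===== SOURCE A (Python) =====
-- def _find_nearest_entity(
--     entities: list[dict],
--     match_context: str,
--     target_types: set[str],
-- ) -> dict | None:
--     """Find the nearest entity of a given type by checking if entity name appears in context."""
--     for entity in entities:
--         if entity.get("entity_type") in target_types:
--             name = entity.get("name", "")
--             if name and name.lower() in match_context.lower():
--                 return entity
--     # Fallback: return first entity of the target type
--     for entity in entities:
--         if entity.get("entity_type") in target_types:
--             return entity
--     return None
-- ===== SOURCE B (Python) =====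
-- def _find_nearest_entity(
--     entities: list[dict],
--     match_context: str,
--     target_types: set[str],
-- ) -> dict | None:
--     """Single pass: return first target-type entity whose name occurs in the
--     context; remember the first target-type entity as fallback."""
--     fallback = None
--     ctx = match_context.lower()
--     for entity in entities:
--         if entity.get("entity_type") in target_types:
--             if fallback is None:
--                 fallback = entity
--             name = entity.get("name", "")
--             if name and name.lower() in ctx:
--                 return entity
--     return fallback
-- ===== Notes on version B (the rewrite author's own statement) =====
-- stated objective: simpler
-- what changed: Replaced A's two full passes over the entity list (match pass, then fallback pass) by a single scan that returns on a name match and keeps the first target-type entity as a fallback, and hoisted match_context.lower() out of the loop.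
import Mathlib
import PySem

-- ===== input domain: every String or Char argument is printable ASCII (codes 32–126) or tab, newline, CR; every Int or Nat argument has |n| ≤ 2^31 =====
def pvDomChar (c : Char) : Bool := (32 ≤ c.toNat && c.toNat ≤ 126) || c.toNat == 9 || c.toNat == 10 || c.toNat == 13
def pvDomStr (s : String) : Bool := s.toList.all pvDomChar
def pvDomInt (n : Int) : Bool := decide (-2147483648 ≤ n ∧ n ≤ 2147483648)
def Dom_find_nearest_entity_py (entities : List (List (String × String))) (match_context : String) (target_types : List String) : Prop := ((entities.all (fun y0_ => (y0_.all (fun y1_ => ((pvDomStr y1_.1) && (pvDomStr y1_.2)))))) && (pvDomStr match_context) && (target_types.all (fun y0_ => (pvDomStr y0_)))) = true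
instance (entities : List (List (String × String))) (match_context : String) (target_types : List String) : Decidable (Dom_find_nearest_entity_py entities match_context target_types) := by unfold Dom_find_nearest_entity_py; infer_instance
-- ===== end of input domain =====

-- B merges A's two passes (name-match pass, then first-target-type fallback pass) into one scan
-- that keeps the first target-type entity as a fallback; objective: simpler.

-- shared condition helpers (the same Python expressions appear in both programs)
-- entity.get("entity_type") in target_types  (None is never in a set of strings)
def pvTypeOk (entity : List (String × String)) (target_types : List String) : Bool :=
  match (PySem.Dict.mk entity).get? "entity_type" with
  | some t => PySem.Set.contains target_types t
  | none => false

-- name = entity.get("name", ""); name and name.lower() in ctx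
def pvNameOk (entity : List (String × String)) (ctx : String) : Bool :=
  let name := (PySem.Dict.mk entity).getD "name" ""
  (name != "") && PySem.Str.isIn (PySem.Str.lower name) ctx

-- ===== PORT A =====
-- first loop of A: return first target-type entity whose name occurs in match_context.lower()
def pvAMatchLoop (match_context : String) (target_types : List String) :
    List (List (String × String)) → Option (List (String × String))
  | [] => none
  | entity :: rest =>
    if pvTypeOk entity target_types then
      if pvNameOk entity (PySem.Str.lower match_context) then some entity
      else pvAMatchLoop match_context target_types rest
    else pvAMatchLoop match_context target_types rest

-- second loop of A: return first target-type entity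
def pvAFallbackLoop (target_types : List String) :
    List (List (String × String)) → Option (List (String × String))
  | [] => none
  | entity :: rest =>
    if pvTypeOk entity target_types then some entity
    else pvAFallbackLoop target_types rest

def find_nearest_entity_py (entities : List (List (String × String))) (match_context : String) (target_types : List String) : Option (List (String × String)) :=
  match pvAMatchLoop match_context target_types entities with
  | some entity => some entity
  | none => pvAFallbackLoop target_types entities

-- ===== PORT B =====
-- single scan with retained fallback state
def pvBLoop (ctx : String) (target_types : List String)
    (fallback : Option (List (String × String))) :
    List (List (String × String)) → Option (List (String × String))
  | [] => fallback
  | entity :: rest =>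
    if pvTypeOk entity target_types then
      let fb := if fallback.isNone then some entity else fallback
      if pvNameOk entity ctx then some entity
      else pvBLoop ctx target_types fb rest
    else pvBLoop ctx target_types fallback rest

def find_nearest_entity_py_alt (entities : List (List (String × String))) (match_context : String) (target_types : List String) : Option (List (String × String)) :=
  pvBLoop (PySem.Str.lower match_context) target_types none entities

-- ===== PRECONDITION & SPEC =====
def Spec_find_nearest_entity_py (entities : List (List (String × String))) (match_context : String) (target_types : List String) (out : Option (List (String × String))) : Prop := out = find_nearest_entity_py_alt entities match_context target_types
instance (entities : List (List (String × String))) (match_context : String) (target_types : List String) (out : Option (List (String × String))) : Decidable (Spec_find_nearest_entity_py entities match_context target_types out) := by unfold Spec_find_nearest_entity_py; infer_instance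

-- ===== CLAIM (what is proved, stated in full; the proofs are below) =====
def Claim_equal_find_nearest_entity_py : Prop := ∀ (entities : List (List (String × String))) (match_context : String) (target_types : List String), Dom_find_nearest_entity_py entities match_context target_types → Spec_find_nearest_entity_py entities match_context target_types (find_nearest_entity_py entities match_context target_types)

-- ===== LEMMAS AND PROOFS =====
theorem pvBLoop_eq (match_context : String) (target_types : List String) :
    ∀ (l : List (List (String × String))) (fb : Option (List (String × String))),
      pvBLoop (PySem.Str.lower match_context) target_types fb l =
        match pvAMatchLoop match_context target_types l with
        | some e => some e
        | none =>
          match fb with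
          | some x => some x
          | none => pvAFallbackLoop target_types l := by
  intro l
  induction l with
  | nil => intro fb; cases fb <;> rfl
  | cons entity rest ih =>
    intro fb
    by_cases ht : pvTypeOk entity target_types
    · by_cases hn : pvNameOk entity (PySem.Str.lower match_context)
      · simp [pvBLoop, pvAMatchLoop, ht, hn]
      · cases fb <;>
          simp [pvBLoop, pvAMatchLoop, pvAFallbackLoop, ht, hn, ih]
    · simp [pvBLoop, pvAMatchLoop, pvAFallbackLoop, ht, ih]

-- ===== VERDICT (by name: the statement is the Claim_ definition above) =====
theorem find_nearest_entity_py_spec : Claim_equal_find_nearest_entity_py := by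
  intro entities match_context target_types _
  unfold Spec_find_nearest_entity_py find_nearest_entity_py find_nearest_entity_py_alt
  rw [pvBLoop_eq]
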